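-- pv_equiv track=rewrite | github.com/va64doman/codility | Challenges/silver2020.py | rectanglesStrip
-- ===== SOURCE A (Python) =====
-- def rectanglesStrip(A, B):
--     def update_results(number):
--         if not (number in results): results[number]=1
--         else: results[number]+=1
--         pass
--     results = {}
--     for rectangle in range(len(A)):
--         update_results(A[rectangle])
--         if A[rectangle]!=B[rectangle]:
--             update_results(B[rectangle])
--     return ((max(list(results.values()))))
--     pass
-- ===== SOURCE B (Python) =====
-- def rectanglesStrip(A, B):
--     # Sort-then-longest-run-of-equals instead of hash counting.
--     vals = []
--     for i in range(len(A)):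
--         vals.append(A[i])
--         if A[i] != B[i]:
--             vals.append(B[i])
--     vals.sort()
--     run_lengths = []
--     run = 0
--     prev = 0
--     for x in vals:
--         run = run + 1 if run > 0 and x == prev else 1
--         run_lengths.append(run)
--         prev = x
--     return max(run_lengths)
-- ===== Notes on version B (the rewrite author's own statement) =====
-- stated objective: alternative
-- what changed: Replaces the incrementally-updated frequency dictionary with building the edge-value list once, sorting it and returning the maximum over the run lengths of equal consecutive elements.
import Mathlib
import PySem

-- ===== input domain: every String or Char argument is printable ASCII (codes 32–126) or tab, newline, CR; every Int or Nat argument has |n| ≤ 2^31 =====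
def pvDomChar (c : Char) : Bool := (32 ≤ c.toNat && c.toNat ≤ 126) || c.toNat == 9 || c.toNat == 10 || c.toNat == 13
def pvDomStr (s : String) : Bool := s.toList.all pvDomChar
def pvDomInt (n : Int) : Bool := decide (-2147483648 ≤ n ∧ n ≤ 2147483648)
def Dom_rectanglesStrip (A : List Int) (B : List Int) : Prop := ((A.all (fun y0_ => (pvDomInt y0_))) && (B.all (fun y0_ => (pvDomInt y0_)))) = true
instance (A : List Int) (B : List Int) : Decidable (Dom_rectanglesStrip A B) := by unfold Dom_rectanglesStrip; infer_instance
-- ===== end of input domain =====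

-- B replaces A's frequency dictionary by sort + maximum run length of equal consecutive elements; same inputs raise (empty A, B shorter than A), same values elsewhere.

-- ===== PORT A =====
-- 'update_results(number)': if the key is absent set it to 1, else increment it
def pvUpd (d : PySem.Dict Int Int) (x : Int) : PySem.Dict Int Int :=
  if d.contains x = false then d.insert x 1 else d.insert x (d.getD x 0 + 1)

def rectanglesStrip (A : List Int) (B : List Int) : Int :=
  let results := (PySem.List.pyRange 0 (A.length : Int) 1).foldl (fun d i =>
      let d := pvUpd d (PySem.List.pyGetD A i 0)
      if PySem.List.pyGetD A i 0 ≠ PySem.List.pyGetD B i 0 then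
        pvUpd d (PySem.List.pyGetD B i 0)
      else d) PySem.Dict.empty
  -- max(list(results.values())); Pre_ excludes the empty case where Python raises ValueError
  (PySem.List.max? results.values (fun y => y)).getD 0

-- ===== PORT B =====
-- the 'for x in vals' pass building run_lengths: state (run, prev)
def pvRuns : List Int → Int → Int → List Int
  | [], _run, _prev => []
  | x :: t, run, prev =>
      let run' := if run > 0 ∧ x = prev then run + 1 else 1
      run' :: pvRuns t run' x

def rectanglesStrip_alt (A : List Int) (B : List Int) : Int :=
  let vals := (PySem.List.pyRange 0 (A.length : Int) 1).foldl (fun acc i =>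
      let acc2 := acc ++ [PySem.List.pyGetD A i 0]
      if PySem.List.pyGetD A i 0 ≠ PySem.List.pyGetD B i 0 then
        acc2 ++ [PySem.List.pyGetD B i 0]
      else acc2) []
  -- max(run_lengths); Pre_ excludes the empty case where Python raises ValueError
  (PySem.List.max? (pvRuns (PySem.List.sorted vals (fun x => x) false) 0 0) (fun y => y)).getD 0

-- ===== PRECONDITION & SPEC =====
-- Pre_ excludes exactly the inputs where both Pythons raise: empty A (ValueError from max of an empty list) and B shorter than A (IndexError).
def Pre_rectanglesStrip (A : List Int) (B : List Int) : Prop := A ≠ [] ∧ A.length ≤ B.length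
instance (A : List Int) (B : List Int) : Decidable (Pre_rectanglesStrip A B) := by unfold Pre_rectanglesStrip; infer_instance
def pvWitness_rectanglesStrip : List Int × List Int := ([1, 2, 2], [2, 2, 3])

def Spec_rectanglesStrip (A : List Int) (B : List Int) (out : Int) : Prop := out = rectanglesStrip_alt A B
instance (A : List Int) (B : List Int) (out : Int) : Decidable (Spec_rectanglesStrip A B out) := by unfold Spec_rectanglesStrip; infer_instance

-- ===== CLAIM (what is proved, stated in full; the proofs are below) =====
def Claim_equal_rectanglesStrip : Prop := ∀ (A : List Int) (B : List Int), Dom_rectanglesStrip A B → Pre_rectanglesStrip A B → Spec_rectanglesStrip A B (rectanglesStrip A B)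

-- ===== LEMMAS AND PROOFS =====

-- the multiset of edge values both programs count, as one flat list
def pvVals (A B : List Int) : List Int :=
  (A.zip B).flatMap (fun p => if p.1 ≠ p.2 then [p.1, p.2] else [p.1])

-- proof-only scan: the running maximum of the run lengths
def pvScan : List Int → Int → Int → Int → Int
  | [], _run, best, _prev => best
  | x :: t, run, best, prev =>
      let run' := if run > 0 ∧ x = prev then run + 1 else 1
      let best' := if run' > best then run' else best
      pvScan t run' best' x

theorem pvUpd_eq (d : PySem.Dict Int Int) (x : Int) :
    pvUpd d x = d.insert x (d.getD x 0 + 1) := by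
  unfold pvUpd
  split
  · rename_i h
    rw [PySem.Dict.getD_of_not_contains d 0 h]
    norm_num
  · rfl

theorem pv_if_max (a b : Int) : (if a > b then a else b) = max b a := by
  split
  · exact (max_eq_right (by omega)).symm
  · exact (max_eq_left (by omega)).symm

theorem pvRuns_foldl_max : ∀ (s : List Int) (run best prev : Int),
    (pvRuns s run prev).foldl max best = pvScan s run best prev := by
  intro s
  induction s with
  | nil => intro run best prev; simp [pvRuns, pvScan]
  | cons x t ih =>
    intro run best prev
    simp only [pvRuns, pvScan, List.foldl_cons, pv_if_max]
    exact ih _ _ _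

theorem pv_count_dropWhile (v : Int) (t : List Int)
    (hs : (v :: t).Pairwise (· ≤ ·)) : (t.dropWhile (· == v)).count v = 0 := by
  induction t with
  | nil => simp
  | cons x t ih =>
    rcases List.pairwise_cons.mp hs with ⟨hv, hs'⟩
    rcases List.pairwise_cons.mp hs' with ⟨hx, ht⟩
    by_cases h : x == v
    · have hxv : x = v := by exact_mod_cast (beq_iff_eq.mp h)
      have : (v :: t).Pairwise (· ≤ ·) := by
        refine List.pairwise_cons.mpr ⟨?_, ht⟩
        intro y hy; exact hxv ▸ hx y hy
      simpa [List.dropWhile, h] using ih this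
    · have hbf : (x == v) = false := by
        cases hxe : (x == v) with
        | false => rfl
        | true => exact absurd hxe h
      have hne : v ≠ x := by
        intro he
        rw [he] at hbf
        simp at hbf
      have hvx : v < x := lt_of_le_of_ne (hv x (by simp)) hne
      rw [List.dropWhile_cons, hbf]
      simp only [Bool.false_eq_true, if_false]
      rw [List.count_eq_zero]
      intro hmem
      rcases List.mem_cons.mp hmem with he | hmem'
      · exact hne he
      · exact absurd (hx v hmem') (not_le.mpr (lt_of_lt_of_le hvx (le_refl x)))

theorem pv_count_takeWhile (v : Int) (t : List Int) :
    (t.takeWhile (· == v)).count v = (t.takeWhile (· == v)).length := by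
  rw [List.count_eq_length]
  intro b hb
  have := List.mem_takeWhile_imp hb
  exact (beq_iff_eq.mp this).symm

theorem pv_count_takeWhile_ne (v u : Int) (hne : u ≠ v) (t : List Int) :
    (t.takeWhile (· == v)).count u = 0 := by
  rw [List.count_eq_zero]
  intro hmem
  have hp := List.mem_takeWhile_imp hmem
  simp at hp
  exact hne hp

theorem pvScan_ge (s : List Int) : ∀ (run best prev : Int), best ≤ pvScan s run best prev := by
  induction s with
  | nil => intro run best prev; simp [pvScan]
  | cons x t ih =>
    intro run best prev
    simp only [pvScan]
    refine le_trans ?_ (ih _ _ _)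
    split <;> split <;> omega

-- a run of copies of prev glides through the scan, extending the current run
theorem pv_glide (R : List Int) : ∀ (T : List Int) (v run best : Int), 0 < run → run ≤ best →
    (∀ x ∈ T, x = v) →
    pvScan (T ++ R) run best v = pvScan R (run + (T.length : Int)) (max best (run + (T.length : Int))) v := by
  intro T
  induction T with
  | nil =>
    intro v run best hrun hbest _
    simp [max_eq_left hbest]
  | cons x T' ih =>
    intro v run best hrun hbest hall
    have hx : x = v := hall x (by simp)
    have hc : run > 0 ∧ x = v := ⟨hrun, hx⟩
    simp only [List.cons_append, pvScan, hc, and_self, if_true, pv_if_max]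
    rw [ih v (run + 1) (max best (run + 1)) (by omega) (le_max_right _ _)
      (fun y hy => hall y (List.mem_cons_of_mem x hy))]
    simp only [List.length_cons]
    push_cast
    have e1 : run + 1 + (T'.length : Int) = run + ((T'.length : Int) + 1) := by ring
    rw [e1]
    have e2 : max (max best (run + 1)) (run + ((T'.length : Int) + 1))
        = max best (run + ((T'.length : Int) + 1)) := by omega
    rw [e2]

-- one sorted step: the head's whole run is consumed in a single glide
theorem pvScan_head (v : Int) (t : List Int) (run best prev : Int)
    (hc : ¬(run > 0 ∧ v = prev)) :
    pvScan (v :: t) run best prev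
      = pvScan (t.dropWhile (· == v)) (1 + ((t.takeWhile (· == v)).length : Int))
          (max best (1 + ((t.takeWhile (· == v)).length : Int))) v := by
  simp only [pvScan, hc, if_false, pv_if_max]
  conv_lhs => rw [← List.takeWhile_append_dropWhile (p := (· == v)) (l := t)]
  rw [pv_glide (t.dropWhile (· == v)) (t.takeWhile (· == v)) v 1 (max best 1) (by omega)
    (le_max_right _ _) (fun y hy => by
      have := List.mem_takeWhile_imp hy
      simpa using this)]
  have e2 : max (max best 1) (1 + ((t.takeWhile (· == v)).length : Int))
      = max best (1 + ((t.takeWhile (· == v)).length : Int)) := by omega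
  rw [e2]

theorem pvScan_count (fuel : Nat) : ∀ (s : List Int) (run best prev : Int),
    s.Pairwise (· ≤ ·) → s.length ≤ fuel → (run ≤ 0 ∨ prev ∉ s) →
    ∀ u ∈ s, (s.count u : Int) ≤ pvScan s run best prev := by
  induction fuel with
  | zero =>
    intro s run best prev _ hlen _ u hu
    rw [List.length_eq_zero_iff.mp (Nat.le_zero.mp hlen)] at hu
    simp at hu
  | succ f ih =>
    intro s run best prev hs hlen hfresh u hu
    cases s with
    | nil => simp at hu
    | cons v t =>
      have hR0 : (t.dropWhile (· == v)).count v = 0 := pv_count_dropWhile v t hs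
      have hRlen : (t.dropWhile (· == v)).length ≤ f := by
        have := List.length_dropWhile_le (· == v) t
        simp at hlen; omega
      have hRp : (t.dropWhile (· == v)).Pairwise (· ≤ ·) :=
        (List.pairwise_cons.mp hs).2.sublist (List.dropWhile_sublist _)
      have hcountt : ∀ w : Int, t.count w
          = (t.takeWhile (· == v)).count w + (t.dropWhile (· == v)).count w := by
        intro w
        conv_lhs => rw [← List.takeWhile_append_dropWhile (p := (· == v)) (l := t)]
        exact List.count_append ..
      have hc : ¬(run > 0 ∧ v = prev) := by
        rcases hfresh with h | h
        · rintro ⟨h1, _⟩; omega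
        · rintro ⟨_, h2⟩; exact h (h2 ▸ List.mem_cons_self)
      rw [pvScan_head v t run best prev hc]
      have hvR : v ∉ t.dropWhile (· == v) := by
        intro hmem
        exact absurd (List.count_pos_iff.mpr hmem) (by omega)
      by_cases huv : u = v
      · subst huv
        have hcnt : (u :: t).count u = (t.takeWhile (· == u)).length + 1 := by
          rw [List.count_cons_self, hcountt u, hR0, pv_count_takeWhile]
        rw [hcnt]
        refine le_trans ?_ (pvScan_ge _ _ _ _)
        push_cast
        omega
      · have hcnt : (v :: t).count u = (t.dropWhile (· == v)).count u := by
          rw [List.count_cons_of_ne (Ne.symm huv), hcountt u,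
            pv_count_takeWhile_ne v u huv]
          omega
        rw [hcnt]
        by_cases hmem : u ∈ t.dropWhile (· == v)
        · exact ih _ _ _ _ hRp hRlen (Or.inr hvR) u hmem
        · rw [List.count_eq_zero.mpr hmem]
          refine le_trans ?_ (pvScan_ge _ _ _ _)
          push_cast
          omega

theorem pvScan_mem (fuel : Nat) : ∀ (s : List Int) (run best prev : Int),
    s.Pairwise (· ≤ ·) → s.length ≤ fuel → (run ≤ 0 ∨ prev ∉ s) →
    pvScan s run best prev = best ∨ ∃ w ∈ s, pvScan s run best prev = (s.count w : Int) := by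
  induction fuel with
  | zero =>
    intro s run best prev _ hlen _
    rw [List.length_eq_zero_iff.mp (Nat.le_zero.mp hlen)]
    left; simp [pvScan]
  | succ f ih =>
    intro s run best prev hs hlen hfresh
    cases s with
    | nil => left; simp [pvScan]
    | cons v t =>
      have hR0 : (t.dropWhile (· == v)).count v = 0 := pv_count_dropWhile v t hs
      have hRlen : (t.dropWhile (· == v)).length ≤ f := by
        have := List.length_dropWhile_le (· == v) t
        simp at hlen; omega
      have hRp : (t.dropWhile (· == v)).Pairwise (· ≤ ·) :=
        (List.pairwise_cons.mp hs).2.sublist (List.dropWhile_sublist _)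
      have hcountt : ∀ w : Int, t.count w
          = (t.takeWhile (· == v)).count w + (t.dropWhile (· == v)).count w := by
        intro w
        conv_lhs => rw [← List.takeWhile_append_dropWhile (p := (· == v)) (l := t)]
        exact List.count_append ..
      have hc : ¬(run > 0 ∧ v = prev) := by
        rcases hfresh with h | h
        · rintro ⟨h1, _⟩; omega
        · rintro ⟨_, h2⟩; exact h (h2 ▸ List.mem_cons_self)
      rw [pvScan_head v t run best prev hc]
      have hvR : v ∉ t.dropWhile (· == v) := by
        intro hmem
        exact absurd (List.count_pos_iff.mpr hmem) (by omega)
      have hcntv : (v :: t).count v = (t.takeWhile (· == v)).length + 1 := by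
        rw [List.count_cons_self, hcountt v, hR0, pv_count_takeWhile]
      rcases ih _ _ _ _ hRp hRlen (Or.inr hvR) with h | ⟨w, hw, hw2⟩
      · rw [h]
        rcases (by omega : 1 + ((t.takeWhile (· == v)).length : Int) ≤ best ∨ best < 1 + ((t.takeWhile (· == v)).length : Int)) with hle | hlt
        · left; omega
        · right
          refine ⟨v, by simp, ?_⟩
          rw [hcntv]
          push_cast
          omega
      · right
        have hwv : w ≠ v := fun he => hvR (he ▸ hw)
        refine ⟨w, ?_, ?_⟩
        · exact List.mem_cons_of_mem v ((List.dropWhile_sublist _).mem hw)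
        · have hcn : (v :: t).count w = (t.dropWhile (· == v)).count w := by
            rw [List.count_cons_of_ne (Ne.symm hwv), hcountt w,
              pv_count_takeWhile_ne v w hwv]
            omega
          rw [hw2, hcn]

-- a fold over range(len(A)) reading A[i], B[i] is a fold over zip(A, B)
theorem pv_range_fold_zip {γ : Type} (F : γ → Int → Int → γ) :
    ∀ (A B : List Int), A.length ≤ B.length → ∀ (d : γ),
    (List.range A.length).foldl (fun d i => F d (A.getD i 0) (B.getD i 0)) d
      = (A.zip B).foldl (fun d p => F d p.1 p.2) d := by
  intro A
  induction A with
  | nil => intro B _ d; simp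
  | cons a A' ihA =>
    intro B hlen d
    cases B with
    | nil => simp at hlen
    | cons b B' =>
      simp only [List.length_cons]
      rw [List.range_succ_eq_map]
      simp only [List.foldl_cons, List.foldl_map, List.getD_cons_zero, List.getD_cons_succ,
        List.zip_cons_cons]
      exact ihA B' (by simpa using hlen) (F d a b)

-- the per-index double update is a plain counting fold over the flattened value list
theorem pv_zip_fold_flat {γ : Type} (ins : γ → Int → γ) :
    ∀ (P : List (Int × Int)) (d : γ),
    P.foldl (fun d p => let d2 := ins d p.1; if p.1 ≠ p.2 then ins d2 p.2 else d2) d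
      = (P.flatMap (fun p => if p.1 ≠ p.2 then [p.1, p.2] else [p.1])).foldl ins d := by
  intro P
  induction P with
  | nil => intro d; simp
  | cons p P' ih =>
    intro d
    simp only [ne_eq, ite_not] at ih
    by_cases h : p.1 = p.2 <;> simp [List.flatMap_cons, h, ne_eq, ite_not, ih]

theorem pv_A_char (A B : List Int) (h : A.length ≤ B.length) :
    rectanglesStrip A B
      = (PySem.List.max? (PySem.Dict.counter (pvVals A B)).values (fun y => y)).getD 0 := by
  unfold rectanglesStrip
  simp only [pvUpd_eq, PySem.List.pyRange_zero_natCast, List.foldl_map,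
    PySem.List.pyGetD_natCast]
  rw [pv_range_fold_zip
    (fun d a b => let d2 := PySem.Dict.insert d a (d.getD a 0 + 1);
      if a ≠ b then PySem.Dict.insert d2 b (d2.getD b 0 + 1) else d2) A B h,
    pv_zip_fold_flat (fun d x => PySem.Dict.insert d x (d.getD x 0 + 1)),
    PySem.Dict.foldl_insert_getD_add_one_eq_counter]
  rfl

theorem pv_B_char (A B : List Int) (h : A.length ≤ B.length) :
    rectanglesStrip_alt A B
      = (PySem.List.max? (pvRuns (PySem.List.sorted (pvVals A B) (fun x => x) false) 0 0)
          (fun y => y)).getD 0 := by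
  unfold rectanglesStrip_alt
  simp only [PySem.List.pyRange_zero_natCast, List.foldl_map, PySem.List.pyGetD_natCast]
  rw [pv_range_fold_zip
    (fun acc a b => let acc2 := acc ++ [a]; if a ≠ b then acc2 ++ [b] else acc2) A B h]
  have hbody : (fun (acc : List Int) (p : Int × Int) =>
      let acc2 := acc ++ [p.1]
      if p.1 ≠ p.2 then acc2 ++ [p.2] else acc2)
      = fun acc p => acc ++ (if p.1 ≠ p.2 then [p.1, p.2] else [p.1]) := by
    funext acc p
    by_cases h : p.1 = p.2 <;> simp [h]
  rw [hbody, PySem.List.foldl_append_eq_flatMap]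
  rfl

-- B's max over run_lengths is the proof-scan's final best
theorem pv_B_scan (A B : List Int) (h : A.length ≤ B.length)
    (hV : pvVals A B ≠ []) :
    rectanglesStrip_alt A B = pvScan (PySem.List.sorted (pvVals A B) (fun x => x) false) 0 0 0 := by
  rw [pv_B_char A B h]
  have hperm := PySem.List.sorted_perm (pvVals A B) (fun x => x) false
  cases hsS : PySem.List.sorted (pvVals A B) (fun x => x) false with
  | nil =>
    exfalso
    rw [hsS] at hperm
    exact hV (List.Perm.nil_eq hperm).symm
  | cons v t =>
    have h1 : pvRuns (v :: t) 0 0 = 1 :: pvRuns t 1 v := by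
      simp [pvRuns]
    rw [h1, PySem.List.max?_id_cons, Option.getD_some, pvRuns_foldl_max]
    have h2 : pvScan (v :: t) 0 0 0 = pvScan t 1 1 v := by
      simp [pvScan]
    rw [h2]

theorem pv_vals_ne_nil (A B : List Int) (hA : A ≠ []) (hlen : A.length ≤ B.length) :
    pvVals A B ≠ [] := by
  cases A with
  | nil => exact absurd rfl hA
  | cons a A' =>
    cases B with
    | nil => simp at hlen
    | cons b B' =>
      by_cases h : a = b <;> simp [pvVals, h]

-- ===== VERDICT (by name: the statement is the Claim_ definition above) =====
theorem rectanglesStrip_spec : Claim_equal_rectanglesStrip := by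
  intro A B _ hpre
  unfold Spec_rectanglesStrip
  obtain ⟨hA, hlen⟩ := hpre
  set V := pvVals A B with hVd
  have hV : V ≠ [] := pv_vals_ne_nil A B hA hlen
  rw [pv_A_char A B hlen, pv_B_scan A B hlen hV]
  have hvals : (PySem.Dict.counter V).values
      = (PySem.Set.ofList V).map (fun k => ((V.count k : Int))) := by
    show ((PySem.Dict.counter V).items).map (·.2) = _
    rw [PySem.Dict.items_counter]
    simp [List.map_map, Function.comp]
  obtain ⟨x, hx⟩ : ∃ x, x ∈ V := List.exists_mem_of_ne_nil V hV
  have hxK : x ∈ PySem.Set.ofList V := (PySem.Set.mem_ofList V x).mpr hx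
  obtain ⟨k0, ks, hK⟩ : ∃ k0 ks, PySem.Set.ofList V = k0 :: ks := by
    cases hK : PySem.Set.ofList V with
    | nil => rw [hK] at hxK; simp at hxK
    | cons k0 ks => exact ⟨k0, ks, rfl⟩
  rw [hvals, hK]
  simp only [List.map_cons, PySem.List.max?_id_cons, Option.getD_some]
  set M := (ks.map (fun k => ((V.count k : Int)))).foldl max ((V.count k0 : Int)) with hM
  have hub : ∀ k, k ∈ PySem.Set.ofList V → ((V.count k : Int)) ≤ M := by
    intro k hk
    rw [hK] at hk
    rcases List.mem_cons.mp hk with he | hk'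
    · rw [he]; exact (PySem.List.le_foldl_max _ _).1
    · exact (PySem.List.le_foldl_max _ _).2 _ (List.mem_map_of_mem hk')
  have hMmem : ∃ k ∈ PySem.Set.ofList V, M = ((V.count k : Int)) := by
    rcases PySem.List.foldl_max_mem (ks.map (fun k => ((V.count k : Int)))) ((V.count k0 : Int)) with h | h
    · exact ⟨k0, by rw [hK]; simp, h⟩
    · rcases List.mem_map.mp h with ⟨k, hk, hk2⟩
      exact ⟨k, by rw [hK]; exact List.mem_cons_of_mem _ hk, hk2.symm⟩
  set s := PySem.List.sorted V (fun x => x) false with hs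
  have hperm : s.Perm V := PySem.List.sorted_perm V (fun x => x) false
  have hpair : s.Pairwise (· ≤ ·) := by
    have := PySem.List.sorted_pairwise V (fun x => x)
    simpa using this
  have hMR : M ≤ pvScan s 0 0 0 := by
    obtain ⟨k, hk, hMk⟩ := hMmem
    have hkV : k ∈ V := (PySem.Set.mem_ofList V k).mp hk
    have hks : k ∈ s := hperm.mem_iff.mpr hkV
    have := pvScan_count s.length s 0 0 0 hpair (le_refl _) (Or.inl (le_refl 0)) k hks
    rw [hperm.count_eq] at this
    rw [hMk]; exact this
  have hRM : pvScan s 0 0 0 ≤ M := by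
    rcases pvScan_mem s.length s 0 0 0 hpair (le_refl _) (Or.inl (le_refl 0)) with h | ⟨w, hw, hw2⟩
    · exfalso
      obtain ⟨k, hk, hMk⟩ := hMmem
      have hkV : k ∈ V := (PySem.Set.mem_ofList V k).mp hk
      have h1 : 1 ≤ V.count k := List.count_pos_iff.mpr hkV
      have h2 := hMR
      rw [h, hMk] at h2
      omega
    · rw [hw2, hperm.count_eq]
      exact hub w ((PySem.Set.mem_ofList V w).mpr (hperm.mem_iff.mp hw))
  exact le_antisymm hRM hMR |>.symm
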